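-- pv_equiv track=rewrite | github.com/NewGuanDanModel/EnhancedGuanDan | actor_n/utils/utils2.py | findAllThreeWithTwo
-- ===== SOURCE A (Python) =====
-- from typing import List, Optional
--
-- def heartLevelCardNum(cardList : List, level : int) -> int:
--     assert len(cardList) == 54
--     return cardList[level - 1]
--
-- def findAllThreeWithTwo(hiddenCards : Optional[List], cNS : List, level : int) -> List:
--     res = [0] * 13
--     if hiddenCards == None:
--         return res
--     heart_level_num = heartLevelCardNum(hiddenCards, level)
--     for i in range(13):
--         if cNS[i] >= 3:
--             for j in range(15):
--                 if i != j and cNS[j] >= 2: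
--                     res[i] = 1
--                     break
--     if heart_level_num == 1:
--         cNS1 = cNS.copy()
--         cNS1[level - 1] -= 1
--         for i in range(13):
--             if cNS1[i] >= 2:
--                 for j in range(15):
--                     if i != j and cNS1[j] >= 2:
--                         res[i] = 1
--                         break
--         for i in range(13):
--             if cNS1[i] >= 3:
--                 for j in range(15):
--                     if (j < 13 and i != j and cNS1[j] >= 1) or (j >= 13 and cNS1[j] == 2):
--                         res[i] = 1
--                         break
--     elif heart_level_num == 2:
--         cNS2 = cNS.copy()
--         cNS2[level - 1] -= 2
--         for i in range(13):
--             if cNS2[i] >= 1: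
--                 for j in range(15):
--                     if (i != j and cNS2[j] >= 2):
--                         res[i] = 1
--                         break
--         for i in range(13):
--             if cNS2[i] >= 2:
--                 for j in range(15):
--                     if (j < 13 and i != j and cNS2[j] >= 1) or (j >= 13 and cNS2[j] == 2):
--                         res[i] = 1
--                         break
--     return res
-- ===== SOURCE B (Python) =====
-- def findAllThreeWithTwo(hiddenCards, cNS, level):
--     if hiddenCards is None:
--         return [0] * 13
--     assert len(hiddenCards) == 54
--     h = hiddenCards[level - 1]
--     pairs0 = sum(1 for j in range(15) if cNS[j] >= 2)
--     if h not in (1, 2):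
--         return [1 if cNS[i] >= 3 and pairs0 >= 2 else 0 for i in range(13)]
--     c = list(cNS)
--     c[level - 1] -= h
--     pairs = sum(1 for j in range(15) if c[j] >= 2)
--     ones = sum(1 for j in range(13) if c[j] >= 1)
--     joker2 = c[13] == 2 or c[14] == 2
--     lo = 3 - h
--     return [1 if (cNS[i] >= 3 and pairs0 >= 2)
--               or (c[i] >= lo and pairs >= 1 + (c[i] >= 2))
--               or (c[i] >= lo + 1 and (ones >= 2 or joker2))
--             else 0 for i in range(13)]
-- ===== Notes on version B (the rewrite author's own statement) =====
-- stated objective: simpler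
-- what changed: Replaced the five nested scan-with-break loops over (rank i, rank j) pairs by aggregate counts computed once (number of pair-capable slots, number of occupied low ranks, a joker-pair flag) and a single list comprehension over the 13 ranks that tests those counts with a self-exclusion adjustment.
import Mathlib
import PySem

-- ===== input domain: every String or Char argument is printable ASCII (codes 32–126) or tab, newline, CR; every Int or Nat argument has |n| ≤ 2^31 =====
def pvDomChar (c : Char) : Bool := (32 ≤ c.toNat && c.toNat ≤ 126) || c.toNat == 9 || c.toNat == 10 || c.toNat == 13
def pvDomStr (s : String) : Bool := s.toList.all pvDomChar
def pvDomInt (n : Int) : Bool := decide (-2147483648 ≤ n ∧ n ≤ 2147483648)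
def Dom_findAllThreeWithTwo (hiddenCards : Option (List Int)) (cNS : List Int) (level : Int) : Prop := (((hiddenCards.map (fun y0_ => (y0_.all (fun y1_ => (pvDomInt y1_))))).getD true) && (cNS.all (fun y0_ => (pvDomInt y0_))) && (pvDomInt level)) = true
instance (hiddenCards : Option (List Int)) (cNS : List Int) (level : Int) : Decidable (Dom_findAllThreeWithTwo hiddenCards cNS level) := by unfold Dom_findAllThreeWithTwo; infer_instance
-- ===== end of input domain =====

-- B replaces A's five nested scan-with-break loops by aggregate counts computed once
-- and a single pass over the 13 ranks (objective: simpler).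


-- ===== PORT A =====
def findAllThreeWithTwo (hiddenCards : Option (List Int)) (cNS : List Int) (level : Int) : List Int :=
  let res : List Int := List.replicate 13 0
  match hiddenCards with
  | none => res
  | some hc =>
    -- heartLevelCardNum: hc[level-1]; its assert len == 54 and the index errors are excluded by Pre_
    let heart := PySem.List.pyGetD hc (level - 1) 0
    let res := (List.range 13).foldl (fun (r : List Int) (i : Nat) =>
      if PySem.List.pyGetD cNS (i : Int) 0 ≥ 3 ∧
         ((List.range 15).any fun j => decide (i ≠ j) && decide (PySem.List.pyGetD cNS (j : Int) 0 ≥ 2)) = true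
      then r.set i 1 else r) res
    if heart = 1 then
      let c1 := PySem.List.pySetD cNS (level - 1) (PySem.List.pyGetD cNS (level - 1) 0 - 1)
      let res := (List.range 13).foldl (fun (r : List Int) (i : Nat) =>
        if PySem.List.pyGetD c1 (i : Int) 0 ≥ 2 ∧
           ((List.range 15).any fun j => decide (i ≠ j) && decide (PySem.List.pyGetD c1 (j : Int) 0 ≥ 2)) = true
        then r.set i 1 else r) res
      let res := (List.range 13).foldl (fun (r : List Int) (i : Nat) =>
        if PySem.List.pyGetD c1 (i : Int) 0 ≥ 3 ∧
           ((List.range 15).any fun j =>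
             (decide (j < 13) && decide (i ≠ j) && decide (PySem.List.pyGetD c1 (j : Int) 0 ≥ 1)) ||
             (decide (13 ≤ j) && decide (PySem.List.pyGetD c1 (j : Int) 0 = 2))) = true
        then r.set i 1 else r) res
      res
    else if heart = 2 then
      let c2 := PySem.List.pySetD cNS (level - 1) (PySem.List.pyGetD cNS (level - 1) 0 - 2)
      let res := (List.range 13).foldl (fun (r : List Int) (i : Nat) =>
        if PySem.List.pyGetD c2 (i : Int) 0 ≥ 1 ∧
           ((List.range 15).any fun j => decide (i ≠ j) && decide (PySem.List.pyGetD c2 (j : Int) 0 ≥ 2)) = true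
        then r.set i 1 else r) res
      let res := (List.range 13).foldl (fun (r : List Int) (i : Nat) =>
        if PySem.List.pyGetD c2 (i : Int) 0 ≥ 2 ∧
           ((List.range 15).any fun j =>
             (decide (j < 13) && decide (i ≠ j) && decide (PySem.List.pyGetD c2 (j : Int) 0 ≥ 1)) ||
             (decide (13 ≤ j) && decide (PySem.List.pyGetD c2 (j : Int) 0 = 2))) = true
        then r.set i 1 else r) res
      res
    else res

-- ===== PORT B =====
def findAllThreeWithTwo_alt (hiddenCards : Option (List Int)) (cNS : List Int) (level : Int) : List Int :=
  match hiddenCards with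
  | none => List.replicate 13 0
  | some hc =>
    let h := PySem.List.pyGetD hc (level - 1) 0
    let pairs0 := (List.range 15).countP (fun (j : Nat) => decide (PySem.List.pyGetD cNS (j : Int) 0 ≥ 2))
    if ¬ (h = 1 ∨ h = 2) then
      (List.range 13).map (fun (i : Nat) =>
        if PySem.List.pyGetD cNS (i : Int) 0 ≥ 3 ∧ pairs0 ≥ 2 then (1 : Int) else 0)
    else
      let c := PySem.List.pySetD cNS (level - 1) (PySem.List.pyGetD cNS (level - 1) 0 - h)
      let pairs := (List.range 15).countP (fun (j : Nat) => decide (PySem.List.pyGetD c (j : Int) 0 ≥ 2))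
      let ones := (List.range 13).countP (fun (j : Nat) => decide (PySem.List.pyGetD c (j : Int) 0 ≥ 1))
      let joker2 := PySem.List.pyGetD c (13 : Int) 0 = 2 ∨ PySem.List.pyGetD c (14 : Int) 0 = 2
      let lo := 3 - h
      (List.range 13).map (fun (i : Nat) =>
        if (PySem.List.pyGetD cNS (i : Int) 0 ≥ 3 ∧ pairs0 ≥ 2) ∨
           (PySem.List.pyGetD c (i : Int) 0 ≥ lo ∧
             (pairs : Int) ≥ 1 + (if PySem.List.pyGetD c (i : Int) 0 ≥ 2 then 1 else 0)) ∨
           (PySem.List.pyGetD c (i : Int) 0 ≥ lo + 1 ∧ (ones ≥ 2 ∨ joker2))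
        then (1 : Int) else 0)

-- ===== PRECONDITION & SPEC =====
-- Pre_ excludes (when hiddenCards is a list): lists not of length 54 (A's assert raises), levels whose
-- hiddenCards index is out of range, heart-branch cNS index errors, and cNS shorter than the 15
-- rank-count slots the function assumes — on such short cNS, A happens to return all-zeros when no
-- rank reaches the trigger thresholds, while B's counting pass reads all 15 slots and raises.
def Pre_findAllThreeWithTwo (hiddenCards : Option (List Int)) (cNS : List Int) (level : Int) : Prop :=
  (hiddenCards.map (fun hc => decide (hc.length = 54 ∧ 15 ≤ cNS.length ∧
      PySem.Raise.InRange 54 (level - 1) ∧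
      ((PySem.List.pyGetD hc (level - 1) 0 = 1 ∨ PySem.List.pyGetD hc (level - 1) 0 = 2) →
        PySem.Raise.InRange cNS.length (level - 1))))).getD true = true
instance (hiddenCards : Option (List Int)) (cNS : List Int) (level : Int) : Decidable (Pre_findAllThreeWithTwo hiddenCards cNS level) := by unfold Pre_findAllThreeWithTwo; infer_instance

def pvWitness_findAllThreeWithTwo : Option (List Int) × List Int × Int :=
  (some (List.replicate 54 0), List.replicate 15 0, 1)

def Spec_findAllThreeWithTwo (hiddenCards : Option (List Int)) (cNS : List Int) (level : Int) (out : List Int) : Prop := out = findAllThreeWithTwo_alt hiddenCards cNS level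
instance (hiddenCards : Option (List Int)) (cNS : List Int) (level : Int) (out : List Int) : Decidable (Spec_findAllThreeWithTwo hiddenCards cNS level out) := by unfold Spec_findAllThreeWithTwo; infer_instance

-- ===== CLAIM (what is proved, stated in full; the proofs are below) =====
def Claim_equal_findAllThreeWithTwo : Prop := ∀ (hiddenCards : Option (List Int)) (cNS : List Int) (level : Int), Dom_findAllThreeWithTwo hiddenCards cNS level → Pre_findAllThreeWithTwo hiddenCards cNS level → Spec_findAllThreeWithTwo hiddenCards cNS level (findAllThreeWithTwo hiddenCards cNS level)

-- ===== LEMMAS AND PROOFS =====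

-- length of one of A's mark loops
theorem pvMarkLen (n : Nat) (C : Nat → Prop) [DecidablePred C] (r : List Int) :
    ((List.range n).foldl (fun (r : List Int) (i : Nat) => if C i then r.set i 1 else r) r).length
      = r.length := by
  induction n with
  | zero => simp
  | succ n ih =>
      rw [List.range_succ, List.foldl_append]
      simp only [List.foldl_cons, List.foldl_nil]
      split <;> simp [ih]

-- elementwise description of one of A's mark loops
theorem pvMarkGet? (n : Nat) (C : Nat → Prop) [DecidablePred C] (r : List Int) (k : Nat)
    (hk : k < r.length) :
    ((List.range n).foldl (fun (r : List Int) (i : Nat) => if C i then r.set i 1 else r) r)[k]? =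
      if k < n ∧ C k then some 1 else r[k]? := by
  induction n with
  | zero => simp
  | succ n ih =>
      rw [List.range_succ, List.foldl_append]
      simp only [List.foldl_cons, List.foldl_nil]
      by_cases hkn : k = n
      · subst hkn
        by_cases hC : C k
        · simp only [hC, if_true, List.getElem?_set]
          simp [pvMarkLen, hk, hC]
        · simp only [hC, if_false, ih]
          simp [hC]
      · have hiff : (k < n + 1 ∧ C k) ↔ (k < n ∧ C k) := by
          constructor <;> rintro ⟨h1, h2⟩ <;> exact ⟨by omega, h2⟩
        by_cases hC : C n
        · simp only [hC, if_true, List.getElem?_set, Ne.symm hkn, if_false, ih, hiff]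
        · simp only [hC, if_false, ih, hiff]

-- countP split: occurrences at index i vs elsewhere
theorem pvCountPSplit (l : List Nat) (i : Nat) (p : Nat → Bool) :
    l.countP p =
      l.countP (fun j => decide (i ≠ j) && p j) + l.count i * (if p i then 1 else 0) := by
  induction l with
  | nil => simp
  | cons a t ih =>
      by_cases hai : a = i
      · subst hai
        by_cases hp : p a <;>
          simp [List.countP_cons, List.count_cons, hp, ih] <;> omega
      · by_cases hp : p a <;>
          simp [List.countP_cons, List.count_cons, hai, Ne.symm hai, hp, ih] <;> omega

-- the self-excluding existence scan as a count test
theorem pvAnyCount (p : Nat → Bool) (n i : Nat) (hi : i < n) :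
    ((List.range n).any fun j => decide (i ≠ j) && p j) = true ↔
      1 + (if p i = true then 1 else 0) ≤ (List.range n).countP p := by
  have hsplit := pvCountPSplit (List.range n) i p
  have hcount : (List.range n).count i = 1 := by simp [List.count_range, hi]
  rw [hcount] at hsplit
  rw [List.any_eq_true, ← List.countP_pos_iff]
  by_cases hp : p i = true
  · simp only [hp, if_true] at hsplit ⊢
    omega
  · simp only [hp, if_false] at hsplit ⊢
    omega

-- the second-type inner scan (low ranks self-excluding, jokers as exact pairs)
theorem pvAnyMixed (q r : Nat → Bool) (i : Nat) (hi : i < 13) :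
    ((List.range 15).any fun j =>
        (decide (j < 13) && decide (i ≠ j) && q j) || (decide (13 ≤ j) && r j)) = true ↔
      (1 + (if q i = true then 1 else 0) ≤ (List.range 13).countP q ∨ r 13 = true ∨ r 14 = true) := by
  have h15 : List.range 15 = List.range 13 ++ [13, 14] := by
    norm_num [List.range_succ]
  rw [h15, List.any_append, Bool.or_eq_true]
  have h1 : (((List.range 13).any fun j =>
      (decide (j < 13) && decide (i ≠ j) && q j) || (decide (13 ≤ j) && r j)) = true) ↔
      (((List.range 13).any fun j => decide (i ≠ j) && q j) = true) := by
    simp only [List.any_eq_true, List.mem_range]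
    constructor
    · rintro ⟨j, hj, hc⟩
      refine ⟨j, hj, ?_⟩
      simpa [hj, Nat.not_le.mpr hj] using hc
    · rintro ⟨j, hj, hc⟩
      simp only [Bool.and_eq_true, decide_eq_true_eq] at hc
      exact ⟨j, hj, by simp [hj, Nat.not_le.mpr hj, hc.1, hc.2]⟩
  have h2 : ((List.any [13, 14] fun j =>
      (decide (j < 13) && decide (i ≠ j) && q j) || (decide (13 ≤ j) && r j)) = true) ↔
      (r 13 = true ∨ r 14 = true) := by
    simp
  rw [h1, h2, pvAnyCount q 13 i hi]

-- one mark loop over the fresh board equals a map of its condition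
theorem pvMark1_eq_map (C1 g : Nat → Prop) [DecidablePred C1] [DecidablePred g]
    (h : ∀ i < 13, (C1 i ↔ g i)) :
    (List.range 13).foldl (fun (r : List Int) (i : Nat) => if C1 i then r.set i 1 else r)
        (List.replicate 13 0) =
      (List.range 13).map (fun (i : Nat) => if g i then (1 : Int) else 0) := by
  apply List.ext_getElem?
  intro k
  by_cases hk : k < 13
  · rw [pvMarkGet? 13 C1 _ k (by simp only [List.length_replicate]; exact hk),
        List.getElem?_map, List.getElem?_range hk]
    simp only [Option.map_some]
    by_cases hg : g k
    · have h1 := (h k hk).mpr hg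
      rw [if_pos ⟨hk, h1⟩, if_pos hg]
    · have h1 : ¬ C1 k := fun hc => hg ((h k hk).mp hc)
      rw [if_neg (by tauto), List.getElem?_replicate, if_pos hk, if_neg hg]
  · rw [List.getElem?_eq_none (by simpa [pvMarkLen] using Nat.le_of_not_lt hk),
        List.getElem?_eq_none (by simpa using Nat.le_of_not_lt hk)]

-- three successive mark loops equal a map of the disjunction of their conditions
theorem pvMark3_eq_map (C1 C2 C3 g : Nat → Prop)
    [DecidablePred C1] [DecidablePred C2] [DecidablePred C3] [DecidablePred g]
    (h : ∀ i < 13, (C1 i ∨ C2 i ∨ C3 i ↔ g i)) :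
    (List.range 13).foldl (fun (r : List Int) (i : Nat) => if C3 i then r.set i 1 else r)
      ((List.range 13).foldl (fun (r : List Int) (i : Nat) => if C2 i then r.set i 1 else r)
        ((List.range 13).foldl (fun (r : List Int) (i : Nat) => if C1 i then r.set i 1 else r)
          (List.replicate 13 0))) =
      (List.range 13).map (fun (i : Nat) => if g i then (1 : Int) else 0) := by
  apply List.ext_getElem?
  intro k
  by_cases hk : k < 13
  · rw [pvMarkGet? 13 C3 _ k (by simp only [pvMarkLen, List.length_replicate]; exact hk),
        pvMarkGet? 13 C2 _ k (by simp only [pvMarkLen, List.length_replicate]; exact hk),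
        pvMarkGet? 13 C1 _ k (by simp only [List.length_replicate]; exact hk),
        List.getElem?_map, List.getElem?_range hk]
    simp only [Option.map_some]
    by_cases hg : g k
    · by_cases h3 : C3 k
      · rw [if_pos ⟨hk, h3⟩, if_pos hg]
      · by_cases h2 : C2 k
        · rw [if_neg (by tauto), if_pos ⟨hk, h2⟩, if_pos hg]
        · have h1 : C1 k := by
            rcases (h k hk).mpr hg with hx | hx | hx
            · exact hx
            · exact absurd hx h2
            · exact absurd hx h3
          rw [if_neg (by tauto), if_neg (by tauto), if_pos ⟨hk, h1⟩, if_pos hg]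
    · have h1 : ¬ C1 k := fun hc => hg ((h k hk).mp (Or.inl hc))
      have h2 : ¬ C2 k := fun hc => hg ((h k hk).mp (Or.inr (Or.inl hc)))
      have h3 : ¬ C3 k := fun hc => hg ((h k hk).mp (Or.inr (Or.inr hc)))
      rw [if_neg (by tauto), if_neg (by tauto), if_neg (by tauto),
          List.getElem?_replicate, if_pos hk, if_neg hg]
  · rw [List.getElem?_eq_none (by simp only [pvMarkLen, List.length_replicate]; omega),
        List.getElem?_eq_none (by simpa using Nat.le_of_not_lt hk)]

-- ===== VERDICT (by name: the statement is the Claim_ definition above) =====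
theorem findAllThreeWithTwo_spec : Claim_equal_findAllThreeWithTwo := by
  intro hiddenCards cNS level _hdom hpre
  unfold Spec_findAllThreeWithTwo
  cases hiddenCards with
  | none => rfl
  | some hc =>
    unfold Pre_findAllThreeWithTwo at hpre
    simp only [Option.map_some, Option.getD_some, decide_eq_true_eq] at hpre
    obtain ⟨h54, h15, hIR, himp⟩ := hpre
    by_cases hh1 : PySem.List.pyGetD hc (level - 1) 0 = 1
    · simp only [findAllThreeWithTwo, findAllThreeWithTwo_alt]
      rw [if_pos hh1, if_neg (show ¬¬(PySem.List.pyGetD hc (level - 1) 0 = 1 ∨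
            PySem.List.pyGetD hc (level - 1) 0 = 2) by tauto)]
      simp only [hh1]
      apply pvMark3_eq_map
      intro i hi
      rw [pvAnyCount (fun j => decide (PySem.List.pyGetD cNS (j : Int) 0 ≥ 2)) 15 i (by omega),
          pvAnyCount (fun j => decide (PySem.List.pyGetD
            (PySem.List.pySetD cNS (level - 1) (PySem.List.pyGetD cNS (level - 1) 0 - 1))
            (j : Int) 0 ≥ 2)) 15 i (by omega),
          pvAnyMixed (fun j => decide (PySem.List.pyGetD
            (PySem.List.pySetD cNS (level - 1) (PySem.List.pyGetD cNS (level - 1) 0 - 1))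
            (j : Int) 0 ≥ 1))
            (fun j => decide (PySem.List.pyGetD
            (PySem.List.pySetD cNS (level - 1) (PySem.List.pyGetD cNS (level - 1) 0 - 1))
            (j : Int) 0 = 2)) i hi]
      simp only [decide_eq_true_eq, Nat.cast_ofNat]
      split_ifs <;> omega
    · by_cases hh2 : PySem.List.pyGetD hc (level - 1) 0 = 2
      · simp only [findAllThreeWithTwo, findAllThreeWithTwo_alt]
        rw [if_neg hh1, if_pos hh2, if_neg (show ¬¬(PySem.List.pyGetD hc (level - 1) 0 = 1 ∨
              PySem.List.pyGetD hc (level - 1) 0 = 2) by tauto)]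
        simp only [hh2]
        apply pvMark3_eq_map
        intro i hi
        rw [pvAnyCount (fun j => decide (PySem.List.pyGetD cNS (j : Int) 0 ≥ 2)) 15 i (by omega),
            pvAnyCount (fun j => decide (PySem.List.pyGetD
              (PySem.List.pySetD cNS (level - 1) (PySem.List.pyGetD cNS (level - 1) 0 - 2))
              (j : Int) 0 ≥ 2)) 15 i (by omega),
            pvAnyMixed (fun j => decide (PySem.List.pyGetD
              (PySem.List.pySetD cNS (level - 1) (PySem.List.pyGetD cNS (level - 1) 0 - 2))
              (j : Int) 0 ≥ 1))
              (fun j => decide (PySem.List.pyGetD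
              (PySem.List.pySetD cNS (level - 1) (PySem.List.pyGetD cNS (level - 1) 0 - 2))
              (j : Int) 0 = 2)) i hi]
        simp only [decide_eq_true_eq, Nat.cast_ofNat]
        split_ifs <;> omega
      · simp only [findAllThreeWithTwo, findAllThreeWithTwo_alt]
        rw [if_neg hh1, if_neg hh2, if_pos (by tauto)]
        apply pvMark1_eq_map
        intro i hi
        rw [pvAnyCount (fun j => decide (PySem.List.pyGetD cNS (j : Int) 0 ≥ 2)) 15 i (by omega)]
        simp only [decide_eq_true_eq]
        split_ifs <;> omega
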